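-- pv_equiv track=rewrite | github.com/Egle2244/Cathay_Exam_questions | lq_3.py | find_last_person
-- ===== SOURCE A (Python) =====
-- def find_last_person(n):
--     people = list(range(1, n + 1))
--     index = 0
--     count = 0
--     while len(people) > 1:
--         count += 1
--         if count == 3:
--             # 報到3的人出圈
--             people.pop(index)
--             count = 0
--         else:
--             index += 1
--
--         if index >= len(people):
--             index = 0
--
--     return people[0]
-- ===== SOURCE B (Python) =====
-- def find_last_person(n):
--     # O(n) Josephus recurrence with k=3: J(1)=0, J(m)=(J(m-1)+3)%m; people are 1-based.
--     j = 0
--     for m in range(2, n + 1):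
--         j = (j + 3) % m
--     return j + 1
-- ===== Notes on version B (the rewrite author's own statement) =====
-- stated objective: faster
-- what changed: Replaces A's O(n^2) circle simulation (repeated list.pop of every 3rd person) with the O(n) closed Josephus recurrence J(1)=0, J(m)=(J(m-1)+3)%m, returning J(n)+1.
-- outside the precondition, e.g. on find_last_person(0): A raises IndexError, B returns 1
import Mathlib
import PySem

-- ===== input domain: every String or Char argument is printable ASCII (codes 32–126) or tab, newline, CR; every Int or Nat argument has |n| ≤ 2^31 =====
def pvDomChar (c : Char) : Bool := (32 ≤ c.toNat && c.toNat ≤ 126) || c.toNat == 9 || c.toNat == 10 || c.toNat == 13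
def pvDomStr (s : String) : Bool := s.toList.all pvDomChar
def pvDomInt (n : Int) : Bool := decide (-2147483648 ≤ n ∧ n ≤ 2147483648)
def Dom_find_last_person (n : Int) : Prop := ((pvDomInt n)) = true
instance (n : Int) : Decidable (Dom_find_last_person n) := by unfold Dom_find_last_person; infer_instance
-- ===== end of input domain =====

-- B replaces A's O(n^2) circle simulation (pop every 3rd person from a list) by the
-- O(n) Josephus recurrence J(1)=0, J(m)=(J(m-1)+3)%m, returning J(n)+1.

-- ===== PORT A =====
-- A's while loop: state (people, index, count); each iteration increments count,
-- pops at index when count hits 3, else advances index, then wraps index.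
-- The '3 ≤ count' branch is a totality guard only: every reachable state has count ∈ {0,1,2}
-- (count is 0 initially and after each pop), so it never fires on a real run.
def josLoop (people : List Int) (index : Nat) (count : Nat) : Int :=
  if 3 ≤ count then 0  -- totality guard, unreachable
  else if people.length ≤ 1 then
    people.headD 0     -- return people[0]; [] would be Python's IndexError, excluded by Pre_
  else if count + 1 = 3 then
    match h : PySem.List.pop? people (index : Int) with
    | some (_, rest) => josLoop rest (if rest.length ≤ index then 0 else index) 0
    | none => 0        -- pop IndexError: unreachable, index < len(people) in every reachable state
  else
    josLoop people (if people.length ≤ index + 1 then 0 else index + 1) (count + 1)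
termination_by (people.length, 2 - count)
decreasing_by
  · apply Prod.Lex.left
    have : (index : Int) = ((index : Nat) : Int) := rfl
    by_cases hlt : index < people.length
    · rw [PySem.List.pop?_natCast people index hlt] at h
      cases h
      simp [List.length_eraseIdx, hlt]
      omega
    · -- out of range: pop? is none for a nonnegative out-of-range index, contradiction
      exfalso
      have : PySem.List.pop? people (index : Int) = none := by
        simp [PySem.List.pop?, PySem.List.pyIdx?]; omega
      simp [this] at h
  · apply Prod.Lex.right
    omega

def find_last_person (n : Int) : Int :=
  josLoop (PySem.List.pyRange 1 (n + 1) 1) 0 0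

-- ===== PORT B =====
def find_last_person_alt (n : Int) : Int :=
  ((PySem.List.pyRange 2 (n + 1) 1).foldl (fun j m => PySem.Int.mod (j + 3) m) 0) + 1

-- ===== PRECONDITION & SPEC =====
-- A raises IndexError (people[0] on the empty list) exactly when n ≤ 0.
def Pre_find_last_person (n : Int) : Prop := 1 ≤ n
instance (n : Int) : Decidable (Pre_find_last_person n) := by unfold Pre_find_last_person; infer_instance
def pvWitness_find_last_person : Int := 5

def Spec_find_last_person (n : Int) (out : Int) : Prop := out = find_last_person_alt n
instance (n : Int) (out : Int) : Decidable (Spec_find_last_person n out) := by unfold Spec_find_last_person; infer_instance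

-- ===== CLAIM (what is proved, stated in full; the proofs are below) =====
def Claim_equal_find_last_person : Prop := ∀ (n : Int), Dom_find_last_person n → Pre_find_last_person n → Spec_find_last_person n (find_last_person n)

-- ===== LEMMAS AND PROOFS =====

-- the Josephus recurrence for k = 3 (0-based survivor position), over Nat
def posN : Nat → Nat
  | 0 => 0
  | 1 => 0
  | (m + 2) => (posN (m + 1) + 3) % (m + 2)

lemma posN_lt (m : Nat) (hm : 1 ≤ m) : posN m < m := by
  match m, hm with
  | 1, _ => decide
  | (k + 2), _ => exact Nat.mod_lt _ (by omega)

lemma posN_succ (k : Nat) (hk : 1 ≤ k) : posN (k + 1) = (posN k + 3) % (k + 1) := by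
  match k, hk with
  | (j + 1), _ => rfl

-- a % d for a < 2d, as a subtraction (all quotients in the index arithmetic are 0 or 1)
lemma mod_small2 (a d : Nat) (h : a < 2 * d) :
    a % d = if d ≤ a then a - d else a := by
  split
  · rw [Nat.mod_eq_sub_mod ‹_›, Nat.mod_eq_of_lt (by omega)]
  · exact Nat.mod_eq_of_lt (by omega)

-- the renumbering arithmetic: removing position i2 = wrap(wrap(i+1)+1) from a circle of m+1
-- and continuing with the m-circle recurrence lands on (i + (J+3) % (m+1)) % (m+1)
lemma idx_arith (m i J i1 i2 j : Nat) (hm : 1 ≤ m) (hi : i < m + 1) (hJ : J < m)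
    (h1 : i1 = if m + 1 ≤ i + 1 then 0 else i + 1)
    (h2 : i2 = if m + 1 ≤ i1 + 1 then 0 else i1 + 1)
    (h3 : j = if m ≤ i2 then 0 else i2) :
    (i + (J + 3) % (m + 1)) % (m + 1) =
      if (j + J) % m < i2 then (j + J) % m else (j + J) % m + 1 := by
  have hi2m : i2 ≤ m := by subst h2 h1; split_ifs <;> omega
  have hjm : j < m := by subst h3; split_ifs <;> omega
  rw [mod_small2 (j + J) m (by omega),
      mod_small2 (J + 3) (m + 1) (by omega),
      mod_small2 _ (m + 1) (by split_ifs <;> omega)]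
  subst h3 h2 h1
  split_ifs <;> omega

-- getD through eraseIdx: indices below p are unchanged, indices ≥ p shift by one
lemma getD_eraseIdx (l : List Int) (p q : Nat) (hp : p < l.length) (hq : q < l.length - 1) :
    (l.eraseIdx p).getD q 0 = l.getD (if q < p then q else q + 1) 0 := by
  have hlen : (l.eraseIdx p).length = l.length - 1 := by simp [List.length_eraseIdx, hp]
  rw [List.getD_eq_getElem l 0 (by split_ifs <;> omega),
      List.getD_eq_getElem _ 0 (by omega), List.getElem_eraseIdx]
  split_ifs <;> simp_all

-- main invariant: from any start index i (count 0), the loop returns the element at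
-- circle position (i + posN len) % len of the current list
lemma josLoop_eq : ∀ (m : Nat), 1 ≤ m → ∀ (l : List Int) (i : Nat), l.length = m → i < m →
    josLoop l i 0 = l.getD ((i + posN m) % m) 0 := by
  intro m hm
  induction m, hm using Nat.le_induction with
  | base =>
    intro l i hlen hi
    match l, hlen with
    | [x], _ =>
      interval_cases i
      simp [josLoop, posN]
  | succ m hm IH =>
    intro l i hlen hi
    -- three unfoldings of the loop: two advance steps, then the pop
    rw [josLoop]
    simp only [hlen, show ¬ (3 ≤ 0) by omega, show ¬ (m + 1 ≤ 1) by omega,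
      show ¬ (0 + 1 = 3) by omega, if_false]
    rw [josLoop]
    simp only [hlen, show ¬ (3 ≤ 1) by omega, show ¬ (m + 1 ≤ 1) by omega,
      show ¬ (1 + 1 = 3) by omega, if_false]
    rw [josLoop]
    set i1 := if m + 1 ≤ i + 1 then 0 else i + 1 with hi1
    set i2 := if m + 1 ≤ i1 + 1 then 0 else i1 + 1 with hi2
    have hi2lt : i2 < m + 1 := by simp only [hi2, hi1]; split_ifs <;> omega
    rw [PySem.List.pop?_natCast l i2 (by omega)]
    have herase : (l.eraseIdx i2).length = m := by
      simp [List.length_eraseIdx, hlen, hi2lt]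
    simp only [hlen, herase, show ¬ (3 ≤ 2) by omega, show ¬ (m + 1 ≤ 1) by omega,
      show (2 + 1 = 3) by omega, if_false, reduceIte]
    rw [IH (l.eraseIdx i2) _ herase (by split_ifs <;> omega)]
    have hJ : posN m < m := posN_lt m hm
    rw [getD_eraseIdx l i2 _ (by omega) (by rw [hlen]; exact Nat.lt_of_lt_of_le (Nat.mod_lt _ (by omega)) (by omega))]
    rw [posN_succ m hm]
    rw [idx_arith m i (posN m) i1 i2 (if m ≤ i2 then 0 else i2) hm hi hJ hi1 hi2 rfl]

-- A's starting list is [1, 2, …, k]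
lemma pyRange_one_to (k : Nat) :
    PySem.List.pyRange 1 ((k : Int) + 1) 1 = (List.range k).map (fun t : Nat => 1 + (t : Int)) := by
  have h1 : (((k : Int) + 1) - 1).toNat = k := by omega
  rw [PySem.List.pyRange_one, h1]

-- B's fold computes posN
lemma foldB_eq : ∀ (k : Nat), 1 ≤ k →
    (PySem.List.pyRange 2 ((k : Int) + 1) 1).foldl (fun j m => PySem.Int.mod (j + 3) m) 0
      = (posN k : Int) := by
  intro k hk
  induction k, hk using Nat.le_induction with
  | base => decide
  | succ k hk1 IH =>
    rw [show ((((k : Nat) + 1 : Nat)) : Int) + 1 = ((k : Int) + 1) + 1 by push_cast; ring,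
        PySem.List.pyRange_one_succ_right (by omega), List.foldl_append, IH]
    simp only [List.foldl_cons, List.foldl_nil]
    rw [show (k : Int) + 1 = ((k + 1 : Nat) : Int) by push_cast; ring,
        show (posN k : Int) + 3 = ((posN k + 3 : Nat) : Int) by push_cast; ring,
        PySem.Int.mod_natCast, posN_succ k hk1]

-- ===== VERDICT (by name: the statement is the Claim_ definition above) =====
theorem find_last_person_spec : Claim_equal_find_last_person := by
  intro n _ hpre
  unfold Pre_find_last_person at hpre
  unfold Spec_find_last_person find_last_person find_last_person_alt
  obtain ⟨k, rfl⟩ : ∃ k : Nat, n = (k : Int) := ⟨n.toNat, by omega⟩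
  have hk : 1 ≤ k := by exact_mod_cast hpre
  rw [pyRange_one_to k, foldB_eq k hk,
      josLoop_eq k hk _ 0 (by simp) (by omega)]
  have hpos := posN_lt k hk
  rw [Nat.zero_add, Nat.mod_eq_of_lt hpos,
      PySem.List.getD_map_range _ k _ 0 hpos]
  ring
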